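-- pv_equiv track=rewrite | github.com/JACKSON-PHARM/pharmasight | pharmasight/backend/kra_certify.py | next_suffix_int_after
-- ===== SOURCE A (Python) =====
-- def next_suffix_int_after(high_water: int, last_digit: int) -> int:
--     ld = int(last_digit) % 10
--     n = int(high_water) + 1
--     while n % 10 != ld:
--         n += 1
--     if n > 9_999_999:
--         raise ValueError("itemCd 7-digit suffix exhausted")
--     return n
-- ===== SOURCE B (Python) =====
-- def next_suffix_int_after(high_water: int, last_digit: int) -> int:
--     # closed-form: smallest integer >= high_water+1 ending in last_digit % 10
--     ld = int(last_digit) % 10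
--     n = int(high_water) + 1
--     m = n + (ld - n) % 10
--     if m > 9_999_999:
--         raise ValueError("itemCd 7-digit suffix exhausted")
--     return m
-- ===== Notes on version B (the rewrite author's own statement) =====
-- stated objective: simpler
-- what changed: replaced the increment-until-last-digit-matches while-loop with the constant-time closed form n + ((ld - n) % 10)
import Mathlib
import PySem

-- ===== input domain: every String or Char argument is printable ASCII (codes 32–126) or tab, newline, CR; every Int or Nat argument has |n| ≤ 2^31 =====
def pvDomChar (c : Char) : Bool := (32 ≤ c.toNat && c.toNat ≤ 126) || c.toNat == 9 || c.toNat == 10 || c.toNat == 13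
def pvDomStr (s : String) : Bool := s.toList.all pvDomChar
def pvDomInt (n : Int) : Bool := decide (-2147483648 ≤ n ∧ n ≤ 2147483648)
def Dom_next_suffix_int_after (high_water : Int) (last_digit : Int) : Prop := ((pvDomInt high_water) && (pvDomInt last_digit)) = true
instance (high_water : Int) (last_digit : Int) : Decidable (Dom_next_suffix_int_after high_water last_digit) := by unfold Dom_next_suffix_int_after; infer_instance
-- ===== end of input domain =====

-- B replaces A's increment-until-digit-matches loop by the closed form n + ((ld - n) % 10); simpler, same values.

-- ===== PORT A =====
-- the while-loop of A; terminates because ld ∈ [0,10) (it is last_digit % 10) and (ld - n) % 10 strictly decreases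
def nsiaLoop (ld : Int) (h0 : 0 ≤ ld) (h1 : ld < 10) (n : Int) : Int :=
  if n % 10 = ld then n else nsiaLoop ld h0 h1 (n + 1)
termination_by ((ld - n) % 10).toNat
decreasing_by omega

def next_suffix_int_after (high_water : Int) (last_digit : Int) : Int :=
  -- `% 10` here is Python's % (divisor positive, so Lean's Int.emod agrees exactly)
  nsiaLoop (last_digit % 10) (Int.emod_nonneg _ (by norm_num)) (Int.emod_lt_of_pos _ (by norm_num)) (high_water + 1)

-- ===== PORT B =====
def next_suffix_int_after_alt (high_water : Int) (last_digit : Int) : Int :=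
  let ld := last_digit % 10
  let n := high_water + 1
  n + (ld - n) % 10

-- ===== PRECONDITION & SPEC =====
-- Pre_ excludes exactly the inputs where the next suffix exceeds 9 999 999 and A raises ValueError.
def Pre_next_suffix_int_after (high_water : Int) (last_digit : Int) : Prop :=
  (high_water + 1) + (last_digit % 10 - (high_water + 1)) % 10 ≤ 9999999
instance (high_water : Int) (last_digit : Int) : Decidable (Pre_next_suffix_int_after high_water last_digit) := by unfold Pre_next_suffix_int_after; infer_instance
def pvWitness_next_suffix_int_after : Int × Int := (1230, 7)

def Spec_next_suffix_int_after (high_water : Int) (last_digit : Int) (out : Int) : Prop := out = next_suffix_int_after_alt high_water last_digit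
instance (high_water : Int) (last_digit : Int) (out : Int) : Decidable (Spec_next_suffix_int_after high_water last_digit out) := by unfold Spec_next_suffix_int_after; infer_instance

-- ===== CLAIM (what is proved, stated in full; the proofs are below) =====
def Claim_equal_next_suffix_int_after : Prop := ∀ (high_water : Int) (last_digit : Int), Dom_next_suffix_int_after high_water last_digit → Pre_next_suffix_int_after high_water last_digit → Spec_next_suffix_int_after high_water last_digit (next_suffix_int_after high_water last_digit)

-- ===== LEMMAS AND PROOFS =====
theorem nsiaLoop_eq (ld : Int) (h0 : 0 ≤ ld) (h1 : ld < 10) (n : Int) :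
    nsiaLoop ld h0 h1 n = n + (ld - n) % 10 := by
  fun_induction nsiaLoop ld h0 h1 n with
  | case1 n h => omega
  | case2 n h ih => rw [ih]; omega

-- ===== VERDICT (by name: the statement is the Claim_ definition above) =====
theorem next_suffix_int_after_spec : Claim_equal_next_suffix_int_after := by
  intro hw ld _ _
  unfold Spec_next_suffix_int_after next_suffix_int_after next_suffix_int_after_alt
  rw [nsiaLoop_eq]
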